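-- pv_equiv track=rewrite | github.com/moritzvitt/editor_focus_mode | config.py | _normalize_field_order
-- ===== SOURCE A (Python) =====
-- def _normalize_field_order(field_order: list[object], all_field_names: list[str]) -> list[str]:
--     ordered: list[str] = []
--     seen: set[str] = set()
--     for item in field_order:
--         name = str(item).strip()
--         if not name or name in seen:
--             continue
--         ordered.append(name)
--         seen.add(name)
--     for field_name in all_field_names:
--         if field_name not in seen:
--             ordered.append(field_name)
--             seen.add(field_name)
--     return ordered
-- ===== SOURCE B (Python) =====
-- def _normalize_field_order(field_order: list[object], all_field_names: list[str]) -> list[str]: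
--     combined = [s for s in (str(item).strip() for item in field_order) if s] + list(all_field_names)
--     # pass 1: occurrences of each name
--     remaining_before = {}
--     for x in combined:
--         remaining_before[x] = remaining_before.get(x, 0) + 1
--     # pass 2: walk backwards; after decrementing, the count is the number of earlier
--     # copies, so a name is kept exactly at its first occurrence
--     kept_rev = []
--     for x in reversed(combined):
--         remaining_before[x] -= 1
--         if remaining_before[x] == 0:
--             kept_rev.append(x)
--     kept_rev.reverse()
--     return kept_rev
-- ===== Notes on version B (the rewrite author's own statement) =====
-- stated objective: alternative
-- what changed: Replaces A's forward pass with a growing seen-set by a counting pass followed by a backward scan that keeps a name exactly when its decremented count of earlier copies reaches zero, then reverses the collected list.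
import Mathlib
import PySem

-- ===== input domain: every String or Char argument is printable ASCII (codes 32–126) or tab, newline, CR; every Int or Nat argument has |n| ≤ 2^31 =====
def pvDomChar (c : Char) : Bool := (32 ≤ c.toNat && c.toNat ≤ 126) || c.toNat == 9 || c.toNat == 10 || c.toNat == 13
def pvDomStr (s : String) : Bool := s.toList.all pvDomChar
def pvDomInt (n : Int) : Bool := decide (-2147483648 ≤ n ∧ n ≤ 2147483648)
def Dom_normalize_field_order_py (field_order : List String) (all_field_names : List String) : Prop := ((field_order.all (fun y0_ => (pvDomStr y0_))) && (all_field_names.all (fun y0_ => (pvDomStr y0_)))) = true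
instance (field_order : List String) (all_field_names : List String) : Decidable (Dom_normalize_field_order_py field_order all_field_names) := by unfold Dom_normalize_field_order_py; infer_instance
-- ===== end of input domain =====

-- B replaces A's forward pass with a growing seen-set by a counting pass plus a backward
-- scan keeping a name when no earlier copy remains (objective: alternative; same value).

-- ===== PORT A =====
-- str(item) on a String argument is the string itself.
-- loop body of A's first loop (over field_order)
def pvStepA (st : List String × PySem.Set String) (item : String) : List String × PySem.Set String :=
  let name := PySem.Str.strip item
  if name = "" ∨ PySem.Set.contains st.2 name = true then st
  else (st.1 ++ [name], PySem.Set.add st.2 name)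

-- loop body of A's second loop (over all_field_names)
def pvStepB (st : List String × PySem.Set String) (field_name : String) : List String × PySem.Set String :=
  if PySem.Set.contains st.2 field_name = true then st
  else (st.1 ++ [field_name], PySem.Set.add st.2 field_name)

def normalize_field_order_py (field_order : List String) (all_field_names : List String) : List String :=
  let s1 := field_order.foldl pvStepA ([], PySem.Set.empty)
  let s2 := all_field_names.foldl pvStepB s1
  s2.1

-- ===== PORT B =====
-- pass 1 body: remaining_before[x] = remaining_before.get(x, 0) + 1
def pvCountStep (d : PySem.Dict String Int) (x : String) : PySem.Dict String Int :=
  d.insert x (d.getD x 0 + 1)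

-- pass 2 body: remaining_before[x] -= 1; if remaining_before[x] == 0: kept_rev.append(x)
def pvScanStep (st : PySem.Dict String Int × List String) (x : String) :
    PySem.Dict String Int × List String :=
  let c := st.1.getD x 0 - 1
  let d := st.1.insert x c
  if c = 0 then (d, st.2 ++ [x]) else (d, st.2)

def normalize_field_order_py_alt (field_order : List String) (all_field_names : List String) : List String :=
  let combined := (field_order.map (fun item => PySem.Str.strip item)).filter (fun s => s ≠ "") ++ all_field_names
  let counts := combined.foldl pvCountStep PySem.Dict.empty
  let res := combined.reverse.foldl pvScanStep (counts, [])
  res.2.reverse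

-- ===== PRECONDITION & SPEC =====
def Spec_normalize_field_order_py (field_order : List String) (all_field_names : List String) (out : List String) : Prop := out = normalize_field_order_py_alt field_order all_field_names
instance (field_order : List String) (all_field_names : List String) (out : List String) : Decidable (Spec_normalize_field_order_py field_order all_field_names out) := by unfold Spec_normalize_field_order_py; infer_instance

-- ===== CLAIM (what is proved, stated in full; the proofs are below) =====
def Claim_equal_normalize_field_order_py : Prop := ∀ (field_order : List String) (all_field_names : List String), Dom_normalize_field_order_py field_order all_field_names → Spec_normalize_field_order_py field_order all_field_names (normalize_field_order_py field_order all_field_names)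

-- ===== LEMMAS AND PROOFS =====

-- A's first loop is its second loop run over the stripped non-empty names.
theorem pv_stepA_eq (st : List String × PySem.Set String) (fo : List String) :
    fo.foldl pvStepA st
      = ((fo.map (fun item => PySem.Str.strip item)).filter (fun s => s ≠ "")).foldl pvStepB st := by
  induction fo generalizing st with
  | nil => rfl
  | cons a tl ih =>
    by_cases h0 : PySem.Str.strip a = ""
    · simp [pvStepA, h0, ih]
    · by_cases hc : PySem.Set.contains st.2 (PySem.Str.strip a) = true
      · simp [pvStepA, pvStepB, h0, ih]
      · simp [pvStepA, pvStepB, h0, ih]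

-- A's loop, started on a paired state (s, s), keeps the pair equal and folds Set.add.
theorem pvStepB_pair (s : PySem.Set String) (a : String) :
    pvStepB (s, s) a = (PySem.Set.add s a, PySem.Set.add s a) := by
  by_cases hm : a ∈ s
  · have hc : PySem.Set.contains s a = true := by simpa [PySem.Set.contains] using hm
    simp [pvStepB, PySem.Set.add, hm]
  · simp [pvStepB, PySem.Set.add, hm]

theorem pv_loopA (l : List String) (s : PySem.Set String) :
    l.foldl pvStepB (s, s) = (l.foldl PySem.Set.add s, l.foldl PySem.Set.add s) := by
  induction l generalizing s with
  | nil => rfl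
  | cons a tl ih =>
    simp only [List.foldl_cons, pvStepB_pair]
    exact ih _

-- pass 1 computes the multiplicities of combined.
theorem pv_counts (l : List String) (d : PySem.Dict String Int) (y : String) :
    (l.foldl pvCountStep d).getD y 0 = d.getD y 0 + (l.count y : Int) := by
  have h : pvCountStep = fun (d : PySem.Dict String Int) x => d.modify x 0 (fun v => v + 1) := rfl
  rw [h]
  exact PySem.Dict.getD_foldl_modify_add_one l d y

-- first-occurrence dedup grows on the right by a fresh element.
theorem pv_dedup_append_singleton (l : List String) (x : String) :
    PySem.List.dedup (l ++ [x])
      = PySem.List.dedup l ++ (if x ∈ l then [] else [x]) := by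
  simp only [PySem.List.dedup_eq_ofList, PySem.Set.ofList_eq_foldl, List.foldl_append,
    List.foldl_cons, List.foldl_nil]
  by_cases hm : x ∈ List.foldl PySem.Set.add [] l
  · have hx : x ∈ l := by
      have := (PySem.Set.mem_ofList l x).1 (by simpa [PySem.Set.ofList_eq_foldl] using hm)
      exact this
    simp [PySem.Set.add, hx, hm]
  · have hx : x ∉ l := by
      intro hxl
      exact hm (by simpa [PySem.Set.ofList_eq_foldl] using (PySem.Set.mem_ofList l x).2 hxl)
    simp [PySem.Set.add, hx, hm]

-- pass 2: folding pvScanStep over r, with counts of r.reverse in the dict, appends the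
-- reversed first-occurrence dedup of r.reverse.
theorem pv_scan (r : List String) (d : PySem.Dict String Int) (out : List String)
    (h : ∀ y, d.getD y 0 = (r.reverse.count y : Int)) :
    (r.foldl pvScanStep (d, out)).2 = out ++ (PySem.List.dedup r.reverse).reverse := by
  induction r generalizing d out with
  | nil => simp [PySem.List.dedup_eq_ofList, PySem.Set.ofList_eq_foldl]
  | cons x r' ih =>
    have hx : d.getD x 0 = (r'.reverse.count x : Int) + 1 := by
      have := h x
      simpa [List.count_append] using this
    have hinv : ∀ y, (d.insert x (d.getD x 0 - 1)).getD y 0 = (r'.reverse.count y : Int) := by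
      intro y
      rw [PySem.Dict.getD_insert]
      by_cases hy : y = x
      · subst hy; rw [if_pos rfl, hx]; ring
      · rw [if_neg hy]
        have := h y
        simpa [List.count_append, List.count_singleton, Ne.symm hy] using this
    have hdedup : (PySem.List.dedup ((x :: r').reverse)).reverse
        = (if x ∈ r'.reverse then [] else [x]) ++ (PySem.List.dedup r'.reverse).reverse := by
      rw [List.reverse_cons, pv_dedup_append_singleton]
      by_cases hm : x ∈ r'.reverse <;> simp [hm]
    by_cases hz : d.getD x 0 - 1 = 0
    · have hcnt : r'.reverse.count x = 0 := by omega
      have hnm : x ∉ r'.reverse := by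
        rw [← List.count_eq_zero]; exact hcnt
      rw [List.foldl_cons]
      have hstep : pvScanStep (d, out) x
          = (d.insert x (d.getD x 0 - 1), out ++ [x]) := by
        simp [pvScanStep, hz]
      rw [hstep, ih _ _ hinv, hdedup, if_neg hnm]
      simp
    · have hnm : x ∈ r'.reverse := by
        by_contra hc
        exact hz (by have := List.count_eq_zero.2 hc; omega)
      rw [List.foldl_cons]
      have hstep : pvScanStep (d, out) x
          = (d.insert x (d.getD x 0 - 1), out) := by
        simp [pvScanStep, hz]
      rw [hstep, ih _ _ hinv, hdedup, if_pos hnm]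
      simp

-- ===== VERDICT (by name: the statement is the Claim_ definition above) =====
theorem normalize_field_order_py_spec : Claim_equal_normalize_field_order_py := by
  intro fo al _
  unfold Spec_normalize_field_order_py normalize_field_order_py normalize_field_order_py_alt
  dsimp only
  rw [pv_stepA_eq, ← List.foldl_append]
  -- A's side: the paired fold is Set.ofList of the concatenation
  have hA : ((((fo.map (fun item => PySem.Str.strip item)).filter (fun s => s ≠ "")) ++ al).foldl
      pvStepB ([], PySem.Set.empty)).1
      = PySem.List.dedup (((fo.map (fun item => PySem.Str.strip item)).filter (fun s => s ≠ "")) ++ al) := by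
    have := pv_loopA ((((fo.map (fun item => PySem.Str.strip item)).filter (fun s => s ≠ "")) ++ al)) []
    simp only [PySem.Set.empty] at this ⊢
    rw [this]
    simp [PySem.List.dedup_eq_ofList, PySem.Set.ofList_eq_foldl]
  -- B's side: the counting pass feeds the backward scan
  have hB : ((((fo.map (fun item => PySem.Str.strip item)).filter (fun s => s ≠ "")) ++ al).reverse.foldl
      pvScanStep
      (((((fo.map (fun item => PySem.Str.strip item)).filter (fun s => s ≠ "")) ++ al).foldl
        pvCountStep PySem.Dict.empty), [])).2
      = (PySem.List.dedup (((fo.map (fun item => PySem.Str.strip item)).filter (fun s => s ≠ "")) ++ al)).reverse := by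
    rw [pv_scan]
    · simp
    · intro y
      rw [pv_counts]
      simp [PySem.Dict.getD_empty]
  rw [hA, hB]
  simp
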